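-- pv_equiv track=rewrite | github.com/kim-byoungkwan/CodingTest_final | 학원/0823김병관/4차 2급 5_my_solution_code.py | solution
-- ===== SOURCE A (Python) =====
-- def solution(calorie):
--     answer = 0
--     min = 1000
--
--     for x in calorie:
--         if min < x:
--             answer += (x - min)
--         else:
--             min = x
--
--     return answer
-- ===== SOURCE B (Python) =====
-- def solution(calorie):
--     # build the prefix-minimum table (baseline 1000), then sum excesses in a second pass
--     mins = [1000]
--     for x in calorie:
--         mins.append(min(mins[-1], x))
--     return sum(x - m for x, m in zip(calorie, mins) if x > m)
-- ===== Notes on version B (the rewrite author's own statement) =====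
-- stated objective: alternative
-- what changed: Replaces the single fused loop that both updates the running min and accumulates with two passes: a prefix-minimum table built first, then a separate summing pass over the paired elements.
import Mathlib
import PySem

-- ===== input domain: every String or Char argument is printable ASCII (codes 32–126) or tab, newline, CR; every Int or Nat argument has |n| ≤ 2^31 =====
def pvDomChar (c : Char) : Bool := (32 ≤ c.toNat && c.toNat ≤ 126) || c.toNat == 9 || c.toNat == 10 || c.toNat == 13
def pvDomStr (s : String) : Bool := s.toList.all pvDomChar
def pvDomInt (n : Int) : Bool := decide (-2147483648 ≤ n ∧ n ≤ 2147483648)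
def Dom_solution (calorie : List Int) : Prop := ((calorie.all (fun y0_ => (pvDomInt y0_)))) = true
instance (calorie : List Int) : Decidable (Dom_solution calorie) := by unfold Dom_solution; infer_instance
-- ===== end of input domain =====

-- B builds a prefix-minimum table first and sums excesses in a second pass; same O(n) cost, different decomposition.

-- ===== PORT A =====
-- A's fused loop: state (answer, min), one pass.
def solution (calorie : List Int) : Int :=
  (calorie.foldl
    (fun (s : Int × Int) x => if s.2 < x then (s.1 + (x - s.2), s.2) else (s.1, x))
    (0, 1000)).1

-- ===== PORT B =====
-- mins = [1000] then append min(mins[-1], x) for each x  ==  scanl min 1000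
def solution_alt (calorie : List Int) : Int :=
  let mins := calorie.scanl (fun m x => min m x) 1000
  (calorie.zip mins).foldl (fun acc p => if p.1 > p.2 then acc + (p.1 - p.2) else acc) 0

-- ===== PRECONDITION & SPEC =====
def Spec_solution (calorie : List Int) (out : Int) : Prop := out = solution_alt calorie
instance (calorie : List Int) (out : Int) : Decidable (Spec_solution calorie out) := by unfold Spec_solution; infer_instance

-- ===== CLAIM (what is proved, stated in full; the proofs are below) =====
def Claim_equal_solution : Prop := ∀ (calorie : List Int), Dom_solution calorie → Spec_solution calorie (solution calorie)

-- ===== LEMMAS AND PROOFS =====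
theorem solution_key (l : List Int) : ∀ (a m : Int),
    (l.foldl
      (fun (s : Int × Int) x => if s.2 < x then (s.1 + (x - s.2), s.2) else (s.1, x))
      (a, m)).1
    = (l.zip (l.scanl (fun m x => min m x) m)).foldl
        (fun acc p => if p.1 > p.2 then acc + (p.1 - p.2) else acc) a := by
  induction l with
  | nil => intro a m; simp
  | cons x l ih =>
    intro a m
    by_cases h : m < x
    · simpa [List.scanl, h, min_eq_left (le_of_lt h)] using ih (a + (x - m)) m
    · simpa [List.scanl, h, min_eq_right (le_of_not_gt h)] using ih a x

-- ===== VERDICT (by name: the statement is the Claim_ definition above) =====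
theorem solution_spec : Claim_equal_solution := by
  intro calorie _
  unfold Spec_solution solution solution_alt
  exact solution_key calorie 0 1000
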